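-- pv_equiv track=rewrite | github.com/dylanlee20/job-tracker | utils/job_utils.py | categorize_job
-- ===== SOURCE A (Python) =====
-- def categorize_job(title, description=''):
--     """
--     Categorize job based on title and description
--
--     Args:
--         title: Job title
--         description: Job description (optional)
--
--     Returns:
--         Category string: 'Investment Banking', 'Sales & Trading',
--                         'Structuring', 'Quant', 'Technology', 'Other'
--     """
--     if not title:
--         return 'Other'
--
--     title_lower = title.lower()
--     desc_lower = description.lower() if description else ''
--     combined = f"{title_lower} {desc_lower}"
--
--     # Investment Banking keywords
--     ib_keywords = [
--         'investment banking', 'ibd', 'ib ', ' ib,', 'mergers', 'acquisitions',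
--         'm&a', 'coverage', 'corporate finance', 'leveraged finance',
--         'private equity', 'pe ', 'growth equity', 'venture capital',
--         'real estate', 'infrastructure', 'energy', 'natural resources',
--         'healthcare banking', 'financial institutions group', 'fig',
--         'technology banking', 'tmt', 'industrials', 'consumer retail',
--         'capital markets', 'ecm', 'dcm', 'equity capital markets',
--         'debt capital markets', 'strategic partners', 'acquisitions'
--     ]
--
--     # Sales & Trading keywords
--     st_keywords = [
--         'sales', 'trading', 'trader', 'sales & trading', 's&t',
--         'equities', 'equity', 'fixed income', 'ficc', 'commodities',
--         'foreign exchange', 'fx', 'forex', 'macro', 'credit trading',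
--         'rates', 'currencies', 'electronic trading', 'market making',
--         'flow trading', 'derivatives', 'options', 'futures'
--     ]
--
--     # Structuring keywords
--     structuring_keywords = [
--         'structuring', 'structured products', 'structured finance',
--         'securitization', 'abs', 'mbs', 'cdo', 'clo',
--         'exotic derivatives', 'structured credit', 'structured solutions'
--     ]
--
--     # Quant keywords
--     quant_keywords = [
--         'quant', 'quantitative', 'quantitative research', 'quantitative trading',
--         'quantitative analytics', 'quantitative strategies', 'quantitative modeling',
--         'risk analytics', 'model validation', 'strat', 'quantitative developer'
--     ]
--
--     # Technology keywords
--     tech_keywords = [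
--         'technology', 'software', 'developer', 'engineer', 'engineering',
--         'data science', 'data scientist', 'machine learning', 'ai ',
--         'artificial intelligence', 'cloud', 'devops', 'cyber',
--         'information security', 'it ', 'systems'
--     ]
--
--     # Research keywords
--     research_keywords = [
--         'research', 'equity research', 'credit research', 'analyst coverage',
--         'sector analyst', 'research associate'
--     ]
--
--     # Check categories in order of specificity
--     if any(keyword in combined for keyword in quant_keywords):
--         return 'Quant'
--
--     if any(keyword in combined for keyword in structuring_keywords):
--         return 'Structuring'
--
--     if any(keyword in combined for keyword in st_keywords):
--         return 'Sales & Trading'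
--
--     if any(keyword in combined for keyword in research_keywords):
--         return 'Research'
--
--     if any(keyword in combined for keyword in ib_keywords):
--         return 'Investment Banking'
--
--     if any(keyword in combined for keyword in tech_keywords):
--         return 'Technology'
--
--     # Default category
--     return 'Other'
-- ===== SOURCE B (Python) =====
-- _CATEGORIES = [
--     ('Quant', [
--         'quant', 'quantitative', 'quantitative research', 'quantitative trading',
--         'quantitative analytics', 'quantitative strategies', 'quantitative modeling',
--         'risk analytics', 'model validation', 'strat', 'quantitative developer'
--     ]),
--     ('Structuring', [
--         'structuring', 'structured products', 'structured finance',
--         'securitization', 'abs', 'mbs', 'cdo', 'clo',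
--         'exotic derivatives', 'structured credit', 'structured solutions'
--     ]),
--     ('Sales & Trading', [
--         'sales', 'trading', 'trader', 'sales & trading', 's&t',
--         'equities', 'equity', 'fixed income', 'ficc', 'commodities',
--         'foreign exchange', 'fx', 'forex', 'macro', 'credit trading',
--         'rates', 'currencies', 'electronic trading', 'market making',
--         'flow trading', 'derivatives', 'options', 'futures'
--     ]),
--     ('Research', [
--         'research', 'equity research', 'credit research', 'analyst coverage',
--         'sector analyst', 'research associate'
--     ]),
--     ('Investment Banking', [
--         'investment banking', 'ibd', 'ib ', ' ib,', 'mergers', 'acquisitions',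
--         'm&a', 'coverage', 'corporate finance', 'leveraged finance',
--         'private equity', 'pe ', 'growth equity', 'venture capital',
--         'real estate', 'infrastructure', 'energy', 'natural resources',
--         'healthcare banking', 'financial institutions group', 'fig',
--         'technology banking', 'tmt', 'industrials', 'consumer retail',
--         'capital markets', 'ecm', 'dcm', 'equity capital markets',
--         'debt capital markets', 'strategic partners', 'acquisitions'
--     ]),
--     ('Technology', [
--         'technology', 'software', 'developer', 'engineer', 'engineering',
--         'data science', 'data scientist', 'machine learning', 'ai ',
--         'artificial intelligence', 'cloud', 'devops', 'cyber',
--         'information security', 'it ', 'systems'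
--     ]),
-- ]
--
-- # one flat keyword table: (keyword, priority rank, category name)
-- _TABLE = [(kw, rank, name)
--           for rank, (name, kws) in enumerate(_CATEGORIES)
--           for kw in kws]
--
--
-- def categorize_job(title, description=''):
--     if not title:
--         return 'Other'
--     combined = f"{title.lower()} {description.lower()}"
--     best = None  # (rank, name) of highest-priority keyword found
--     for kw, rank, name in _TABLE:
--         if kw in combined and (best is None or rank < best[0]):
--             best = (rank, name)
--     return best[1] if best is not None else 'Other'
-- ===== Notes on version B (the rewrite author's own statement) =====
-- stated objective: alternative
-- what changed: Replaced A's six short-circuiting any()-per-category if-branches with a single flat keyword table carrying priority ranks (Quant=0 ... Technology=5) and one minimum-rank selection pass over the table, mapping the best rank's category name back at the end.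
import Mathlib
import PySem

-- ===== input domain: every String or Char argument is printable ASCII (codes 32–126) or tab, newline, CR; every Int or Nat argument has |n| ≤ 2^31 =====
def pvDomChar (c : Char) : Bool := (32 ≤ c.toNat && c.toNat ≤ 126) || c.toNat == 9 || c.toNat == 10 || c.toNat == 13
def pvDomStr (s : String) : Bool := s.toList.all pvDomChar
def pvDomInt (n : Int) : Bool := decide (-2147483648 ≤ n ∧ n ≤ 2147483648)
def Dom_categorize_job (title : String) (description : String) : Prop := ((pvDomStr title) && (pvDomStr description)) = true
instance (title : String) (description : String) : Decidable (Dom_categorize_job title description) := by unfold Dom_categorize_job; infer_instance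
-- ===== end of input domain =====

-- B replaces A's six short-circuiting category checks with one flat keyword table
-- carrying priority ranks and a single minimum-rank selection pass (objective: alternative).

-- ===== PORT A =====
def aQuantKws : List String :=
  ["quant", "quantitative", "quantitative research", "quantitative trading",
   "quantitative analytics", "quantitative strategies", "quantitative modeling",
   "risk analytics", "model validation", "strat", "quantitative developer"]

def aStructuringKws : List String :=
  ["structuring", "structured products", "structured finance",
   "securitization", "abs", "mbs", "cdo", "clo",
   "exotic derivatives", "structured credit", "structured solutions"]

def aStKws : List String :=
  ["sales", "trading", "trader", "sales & trading", "s&t",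
   "equities", "equity", "fixed income", "ficc", "commodities",
   "foreign exchange", "fx", "forex", "macro", "credit trading",
   "rates", "currencies", "electronic trading", "market making",
   "flow trading", "derivatives", "options", "futures"]

def aResearchKws : List String :=
  ["research", "equity research", "credit research", "analyst coverage",
   "sector analyst", "research associate"]

def aIbKws : List String :=
  ["investment banking", "ibd", "ib ", " ib,", "mergers", "acquisitions",
   "m&a", "coverage", "corporate finance", "leveraged finance",
   "private equity", "pe ", "growth equity", "venture capital",
   "real estate", "infrastructure", "energy", "natural resources",
   "healthcare banking", "financial institutions group", "fig",
   "technology banking", "tmt", "industrials", "consumer retail",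
   "capital markets", "ecm", "dcm", "equity capital markets",
   "debt capital markets", "strategic partners", "acquisitions"]

def aTechKws : List String :=
  ["technology", "software", "developer", "engineer", "engineering",
   "data science", "data scientist", "machine learning", "ai ",
   "artificial intelligence", "cloud", "devops", "cyber",
   "information security", "it ", "systems"]

def categorize_job (title : String) (description : String) : String :=
  if title = "" then "Other"
  else
    let title_lower := PySem.Str.lower title
    let desc_lower := if description = "" then "" else PySem.Str.lower description
    let combined := title_lower ++ " " ++ desc_lower
    if aQuantKws.any (fun k => PySem.Str.isIn k combined) then "Quant"
    else if aStructuringKws.any (fun k => PySem.Str.isIn k combined) then "Structuring"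
    else if aStKws.any (fun k => PySem.Str.isIn k combined) then "Sales & Trading"
    else if aResearchKws.any (fun k => PySem.Str.isIn k combined) then "Research"
    else if aIbKws.any (fun k => PySem.Str.isIn k combined) then "Investment Banking"
    else if aTechKws.any (fun k => PySem.Str.isIn k combined) then "Technology"
    else "Other"

-- ===== PORT B =====
def bCategories : List (String × List String) :=
  [("Quant",
    ["quant", "quantitative", "quantitative research", "quantitative trading",
     "quantitative analytics", "quantitative strategies", "quantitative modeling",
     "risk analytics", "model validation", "strat", "quantitative developer"]),
   ("Structuring",
    ["structuring", "structured products", "structured finance",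
     "securitization", "abs", "mbs", "cdo", "clo",
     "exotic derivatives", "structured credit", "structured solutions"]),
   ("Sales & Trading",
    ["sales", "trading", "trader", "sales & trading", "s&t",
     "equities", "equity", "fixed income", "ficc", "commodities",
     "foreign exchange", "fx", "forex", "macro", "credit trading",
     "rates", "currencies", "electronic trading", "market making",
     "flow trading", "derivatives", "options", "futures"]),
   ("Research",
    ["research", "equity research", "credit research", "analyst coverage",
     "sector analyst", "research associate"]),
   ("Investment Banking",
    ["investment banking", "ibd", "ib ", " ib,", "mergers", "acquisitions",
     "m&a", "coverage", "corporate finance", "leveraged finance",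
     "private equity", "pe ", "growth equity", "venture capital",
     "real estate", "infrastructure", "energy", "natural resources",
     "healthcare banking", "financial institutions group", "fig",
     "technology banking", "tmt", "industrials", "consumer retail",
     "capital markets", "ecm", "dcm", "equity capital markets",
     "debt capital markets", "strategic partners", "acquisitions"]),
   ("Technology",
    ["technology", "software", "developer", "engineer", "engineering",
     "data science", "data scientist", "machine learning", "ai ",
     "artificial intelligence", "cloud", "devops", "cyber",
     "information security", "it ", "systems"])]

-- flat keyword table: (keyword, priority rank, category name)
def bTable : List (String × Int × String) :=
  (PySem.List.enumerate bCategories).flatMap (fun p => p.2.2.map (fun k => (k, p.1, p.2.1)))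

-- loop body: keep the best (lowest-rank) matching table entry seen so far
def bStep (mtch : String → Bool) (best : Option (Int × String)) (e : String × Int × String) :
    Option (Int × String) :=
  if mtch e.1 &&
      (match best with | none => true | some b => decide (e.2.1 < b.1)) then
    some e.2
  else best

def categorize_job_alt (title : String) (description : String) : String :=
  if title = "" then "Other"
  else
    let combined := PySem.Str.lower title ++ " " ++ PySem.Str.lower description
    let best := bTable.foldl (bStep (fun k => PySem.Str.isIn k combined)) none
    match best with
    | some b => b.2
    | none => "Other"

-- ===== PRECONDITION & SPEC =====
def Spec_categorize_job (title : String) (description : String) (out : String) : Prop := out = categorize_job_alt title description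
instance (title : String) (description : String) (out : String) : Decidable (Spec_categorize_job title description out) := by unfold Spec_categorize_job; infer_instance

-- ===== CLAIM (what is proved, stated in full; the proofs are below) =====
def Claim_equal_categorize_job : Prop := ∀ (title : String) (description : String), Dom_categorize_job title description → Spec_categorize_job title description (categorize_job title description)

-- ===== LEMMAS AND PROOFS =====

-- merge a whole same-rank group into the running best
def updMin (best : Option (Int × String)) (x : Int × String) : Option (Int × String) :=
  match best with
  | none => some x
  | some b => if x.1 < b.1 then some x else best

theorem updMin_idem (best : Option (Int × String)) (x : Int × String) :
    updMin (updMin best x) x = updMin best x := by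
  cases best with
  | none => simp [updMin]
  | some b => by_cases h : x.1 < b.1 <;> simp [updMin, h]

theorem foldl_bStep_group (p : String → Bool) (kws : List String) (r : Int) (n : String)
    (best : Option (Int × String)) :
    (kws.map (fun k => (k, r, n))).foldl (bStep p) best =
      if kws.any p then updMin best (r, n) else best := by
  induction kws generalizing best with
  | nil => simp
  | cons k ks ih =>
    rw [List.map_cons, List.foldl_cons, ih, List.any_cons]
    cases hk : p k with
    | true =>
      have hstep : bStep p best (k, r, n) = updMin best (r, n) := by
        cases best with
        | none => simp [bStep, updMin, hk]
        | some b => by_cases h : r < b.1 <;> simp [bStep, updMin, hk, h]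
      rw [hstep]
      cases hks : ks.any p <;> simp [updMin_idem]
    | false =>
      have hstep : bStep p best (k, r, n) = best := by
        cases best <;> simp [bStep, hk]
      rw [hstep]
      simp
theorem lower_empty : PySem.Str.lower "" = "" := by decide

theorem bTable_eq :
    bTable = (aQuantKws.map (fun k => (k, (0 : Int), "Quant")))
      ++ (aStructuringKws.map (fun k => (k, (1 : Int), "Structuring")))
      ++ (aStKws.map (fun k => (k, (2 : Int), "Sales & Trading")))
      ++ (aResearchKws.map (fun k => (k, (3 : Int), "Research")))
      ++ (aIbKws.map (fun k => (k, (4 : Int), "Investment Banking")))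
      ++ (aTechKws.map (fun k => (k, (5 : Int), "Technology"))) := by
  rfl

theorem categorize_eq (title description : String) :
    categorize_job title description = categorize_job_alt title description := by
  by_cases ht : title = ""
  · simp [categorize_job, categorize_job_alt, ht]
  · have hdesc : (if description = "" then "" else PySem.Str.lower description) =
        PySem.Str.lower description := by
      by_cases hd : description = ""
      · simp [hd, lower_empty]
      · simp [hd]
    unfold categorize_job categorize_job_alt
    simp only [ht, if_false, hdesc]
    rw [bTable_eq]
    simp only [List.foldl_append, foldl_bStep_group]
    generalize (aQuantKws.any fun k =>
        PySem.Str.isIn k (PySem.Str.lower title ++ " " ++ PySem.Str.lower description)) = b0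
    generalize (aStructuringKws.any fun k =>
        PySem.Str.isIn k (PySem.Str.lower title ++ " " ++ PySem.Str.lower description)) = b1
    generalize (aStKws.any fun k =>
        PySem.Str.isIn k (PySem.Str.lower title ++ " " ++ PySem.Str.lower description)) = b2
    generalize (aResearchKws.any fun k =>
        PySem.Str.isIn k (PySem.Str.lower title ++ " " ++ PySem.Str.lower description)) = b3
    generalize (aIbKws.any fun k =>
        PySem.Str.isIn k (PySem.Str.lower title ++ " " ++ PySem.Str.lower description)) = b4
    generalize (aTechKws.any fun k =>
        PySem.Str.isIn k (PySem.Str.lower title ++ " " ++ PySem.Str.lower description)) = b5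
    cases b0 <;> cases b1 <;> cases b2 <;> cases b3 <;> cases b4 <;> cases b5 <;>
      simp [updMin]

-- ===== VERDICT (by name: the statement is the Claim_ definition above) =====
theorem categorize_job_spec : Claim_equal_categorize_job := by
  intro title description _
  exact categorize_eq title description
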